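-- pv_equiv track=rewrite | github.com/HecatePhy/Advent-of-Code-2025 | src/day6.py | calculate_grand_total_pixel
-- ===== SOURCE A (Python) =====
-- def calculate_grand_total_pixel(lines):
--     grand_tot = 0
--     lines = [line.rstrip('\n') for line in lines]
--     num_rows = len(lines)
--     num_cols = len(lines[0])
--
--     cur_set = []
--     for i in range(num_cols-1, -1, -1):
--         cur_num = 0
--         flag = False
--         for j in range(num_rows-1):
--             if lines[j][i] != ' ':
--                 cur_num = cur_num * 10 + int(lines[j][i])
--                 flag = True
--         if flag:
--             cur_set.append(cur_num)
--
--         if i < len(lines[-1]) and lines[-1][i] != ' ':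
--             symbol = lines[-1][i]
--             res = 0 if symbol == '+' else 1
--             for num in cur_set:
--                 res = res + num if symbol == '+' \
--                     else res * num
--             cur_set = []
--             grand_tot += res
--
--     return grand_tot
-- ===== SOURCE B (Python) =====
-- def calculate_grand_total_pixel(lines):
--     rows = [line.rstrip('\n') for line in lines]
--     width = len(rows[0])
--     body, tail = rows[:-1], rows[-1]
--
--     # number held in each column (rows above the symbol row), or None
--     col_num = []
--     for i in range(width):
--         digits = [row[i] for row in body if row[i] != ' ']
--         if digits:
--             n = 0
--             for d in digits:
--                 n = n * 10 + int(d)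
--             col_num.append(n)
--         else:
--             col_num.append(None)
--
--     # symbol columns (ascending), each paired with the next symbol column
--     # (or width) as the exclusive right edge of its group
--     sym_cols = [i for i in range(width) if i < len(tail) and tail[i] != ' ']
--     total = 0
--     for p, q in zip(sym_cols, sym_cols[1:] + [width]):
--         group = [n for n in col_num[p:q] if n is not None]
--         if tail[p] == '+':
--             total += sum(group)
--         else:
--             prod = 1
--             for n in group:
--                 prod *= n
--             total += prod
--     return total
-- ===== Notes on version B (the rewrite author's own statement) =====
-- stated objective: alternative
-- what changed: Replaces the right-to-left accumulate-and-reset column scan with building a per-column number table plus the list of symbol columns, then aggregating each [symbol, next-symbol) slice independently left-to-right.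
import Mathlib
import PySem

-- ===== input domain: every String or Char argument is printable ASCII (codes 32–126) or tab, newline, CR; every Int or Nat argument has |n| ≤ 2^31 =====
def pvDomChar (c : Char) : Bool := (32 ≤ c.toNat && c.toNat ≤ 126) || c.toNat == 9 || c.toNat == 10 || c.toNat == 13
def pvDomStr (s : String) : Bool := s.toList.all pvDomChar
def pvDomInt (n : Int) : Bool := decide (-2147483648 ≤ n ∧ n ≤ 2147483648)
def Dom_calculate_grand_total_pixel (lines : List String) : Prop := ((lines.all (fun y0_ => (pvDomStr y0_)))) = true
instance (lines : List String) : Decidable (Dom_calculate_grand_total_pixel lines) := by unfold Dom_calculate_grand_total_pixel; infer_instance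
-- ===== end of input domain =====

-- B replaces A's right-to-left accumulate-and-reset column scan by a per-column number
-- table plus the list of symbol columns, aggregating each [symbol, next-symbol) slice
-- independently (objective: alternative decomposition, same asymptotic cost).

-- ===== PORT A =====
-- line.rstrip('\n') : drop trailing '\n' characters (exact; rstrip with an explicit char set)
def pvNorm (s : String) : List Char :=
  List.rdropWhile (fun c => c == '\n') s.toList

-- int(ch) for a single digit character (Pre_ guarantees ch is '0'..'9' wherever this is reached)
def pvInt (ch : Char) : Int := (ch.toNat : Int) - 48

def calculate_grand_total_pixel (lines : List String) : Int :=
  let rows : List (List Char) := lines.map pvNorm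
  let num_rows : Nat := rows.length
  let num_cols : Nat := (rows.headD []).length      -- len(lines[0]); Pre_ excludes lines = []
  let last : List Char := rows.getLastD []          -- lines[-1]
  let st := (PySem.List.pyRange ((num_cols : Int) - 1) (-1) (-1)).foldl
    (fun (st : List Int × Int) (i : Int) =>
      -- inner j-loop building (cur_num, flag)
      let inner := (PySem.List.pyRange 0 ((num_rows : Int) - 1) 1).foldl
        (fun (p : Int × Bool) (j : Int) =>
          let ch := PySem.List.pyGetD (PySem.List.pyGetD rows j []) i ' '  -- lines[j][i]; in range on Pre_
          if ch ≠ ' ' then (p.1 * 10 + pvInt ch, true) else p)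
        ((0 : Int), false)
      let cur_set := if inner.2 then st.1 ++ [inner.1] else st.1
      if i < (last.length : Int) ∧ PySem.List.pyGetD last i ' ' ≠ ' ' then
        let symbol := PySem.List.pyGetD last i ' '
        let res : Int := cur_set.foldl
          (fun r n => if symbol = '+' then r + n else r * n)
          (if symbol = '+' then (0 : Int) else 1)
        (([] : List Int), st.2 + res)
      else (cur_set, st.2))
    (([] : List Int), (0 : Int))
  st.2

-- ===== PORT B =====
def calculate_grand_total_pixel_alt (lines : List String) : Int :=
  let rows : List (List Char) := lines.map pvNorm
  let width : Nat := (rows.headD []).length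
  let body : List (List Char) := rows.dropLast      -- rows[:-1]
  let tail : List Char := rows.getLastD []          -- rows[-1]
  let col_num : List (Option Int) := (List.range width).map (fun (i : Nat) =>
    let digits := (body.map (fun row => PySem.List.pyGetD row (i : Int) ' ')).filter
      (fun c => c ≠ ' ')
    if digits = [] then none
    else some (digits.foldl (fun n d => n * 10 + pvInt d) 0))
  let sym_cols : List Nat := (List.range width).filter
    (fun (i : Nat) => decide ((i : Int) < (tail.length : Int)) && decide (PySem.List.pyGetD tail (i : Int) ' ' ≠ ' '))
  (sym_cols.zip (sym_cols.drop 1 ++ [width])).foldl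
    (fun total pq =>
      -- col_num[p:q] with 0 ≤ p ≤ q ≤ width, exact as drop/take
      let group := ((col_num.drop pq.1).take (pq.2 - pq.1)).filterMap id
      total + (if PySem.List.pyGetD tail (pq.1 : Int) ' ' = '+' then group.sum
               else group.foldl (· * ·) 1))
    0

-- ===== PRECONDITION & SPEC =====
-- Pre_ admits exactly the inputs where A returns normally; it excludes only inputs where A
-- raises: empty input (IndexError on lines[0]), a body row shorter than the first line
-- (IndexError on lines[j][i]), or a non-digit non-space character in a scanned body cell
-- (ValueError from int()).
def Pre_calculate_grand_total_pixel (lines : List String) : Prop :=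
  lines ≠ [] ∧
  ((lines.map pvNorm).dropLast.all (fun row =>
    decide ((pvNorm (lines.headD "")).length ≤ row.length) &&
    (row.take (pvNorm (lines.headD "")).length).all
      (fun c => c == ' ' || PySem.Chars.isdigit c))) = true
instance (lines : List String) : Decidable (Pre_calculate_grand_total_pixel lines) := by
  unfold Pre_calculate_grand_total_pixel; infer_instance

def pvWitness_calculate_grand_total_pixel : List String := ["12", "+ "]

def Spec_calculate_grand_total_pixel (lines : List String) (out : Int) : Prop := out = calculate_grand_total_pixel_alt lines
instance (lines : List String) (out : Int) : Decidable (Spec_calculate_grand_total_pixel lines out) := by unfold Spec_calculate_grand_total_pixel; infer_instance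

-- ===== CLAIM (what is proved, stated in full; the proofs are below) =====
def Claim_equal_calculate_grand_total_pixel : Prop := ∀ (lines : List String), Dom_calculate_grand_total_pixel lines → Pre_calculate_grand_total_pixel lines → Spec_calculate_grand_total_pixel lines (calculate_grand_total_pixel lines)

-- ===== LEMMAS AND PROOFS =====

-- value of column i (B's col_num entry, as a function of the body rows)
def pvCN (body : List (List Char)) (i : Nat) : Option Int :=
  let digits := (body.map (fun row => PySem.List.pyGetD row (i : Int) ' ')).filter
    (fun c => c ≠ ' ')
  if digits = [] then none
  else some (digits.foldl (fun n d => n * 10 + pvInt d) 0)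

-- is column i a symbol column of the tail row
def pvSym (tail : List Char) (i : Nat) : Bool :=
  decide ((i : Int) < (tail.length : Int)) && decide (PySem.List.pyGetD tail (i : Int) ' ' ≠ ' ')

-- reduce a group with the symbol at column p
def pvRed (tail : List Char) (p : Nat) (l : List Int) : Int :=
  if PySem.List.pyGetD tail (p : Int) ' ' = '+' then l.sum else l.prod

-- the numbers held in columns [p, q)
def pvNums (body : List (List Char)) (p q : Nat) : List Int :=
  (List.range' p (q - p)).filterMap (pvCN body)

-- A's outer loop re-expressed as recursion on the number of columns still to scan
def pvLoopA (body : List (List Char)) (tail : List Char) : Nat → List Int → Int → Int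
  | 0, _, tot => tot
  | q + 1, set, tot =>
    let set' := set ++ (pvCN body q).toList
    if pvSym tail q then pvLoopA body tail q [] (tot + pvRed tail q set')
    else pvLoopA body tail q set' tot

-- grand total over a DESCENDING list of symbol columns with upper bound q; `set` is the
-- pending pool of numbers above q that belongs to the topmost group
def pvGdesc (body : List (List Char)) (tail : List Char) : List Nat → Nat → List Int → Int
  | [], _, _ => 0
  | p :: ps, q, set => pvRed tail p (pvNums body p q ++ set) + pvGdesc body tail ps p []

-- grand total over an ASCENDING list of symbol columns with final bound b (B's shape)
def pvCsum (body : List (List Char)) (tail : List Char) : List Nat → Nat → Int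
  | [], _ => 0
  | p :: ps, b => pvRed tail p (pvNums body p (ps.headD b)) + pvCsum body tail ps b

-- all symbol columns below q, ascending
def pvSyms (tail : List Char) (q : Nat) : List Nat :=
  (List.range q).filter (pvSym tail)

theorem pvRed_perm (tail : List Char) (p : Nat) {l l' : List Int}
    (h : l.Perm l') : pvRed tail p l = pvRed tail p l' := by
  unfold pvRed
  split
  · exact h.sum_eq
  · exact h.prod_eq

theorem pvNums_succ (body : List (List Char)) (p q : Nat) (h : p ≤ q) :
    pvNums body p (q + 1) = pvNums body p q ++ (pvCN body q).toList := by
  unfold pvNums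
  have h1 : q + 1 - p = (q - p) + 1 := by omega
  rw [h1, List.range'_1_concat, List.filterMap_append]
  have hpq : p + (q - p) = q := by omega
  rw [hpq]
  cases hc : pvCN body q <;> simp [hc, Option.toList]

theorem pvNums_self (body : List (List Char)) (q : Nat) :
    pvNums body q (q + 1) = (pvCN body q).toList := by
  unfold pvNums
  have h1 : q + 1 - q = 1 := by omega
  rw [h1]
  cases hc : pvCN body q <;>
    simp [List.range', hc, Option.toList]

theorem pvSyms_succ (tail : List Char) (q : Nat) :
    pvSyms tail (q + 1) = pvSyms tail q ++ if pvSym tail q then [q] else [] := by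
  unfold pvSyms
  rw [List.range_succ, List.filter_append]
  cases h : pvSym tail q <;> simp [h]

theorem pvSyms_lt (tail : List Char) (q : Nat) : ∀ p ∈ pvSyms tail q, p < q := by
  intro p hp
  unfold pvSyms at hp
  simp [List.mem_filter, List.mem_range] at hp
  exact hp.1

-- shifting the bound of a descending group list down by one column
theorem pvGdesc_shift (body : List (List Char)) (tail : List Char)
    (ps : List Nat) (q : Nat) (set : List Int)
    (h : ∀ p ∈ ps, p ≤ q) :
    pvGdesc body tail ps (q + 1) set = pvGdesc body tail ps q (set ++ (pvCN body q).toList) := by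
  cases ps with
  | nil => simp [pvGdesc]
  | cons p ps' =>
    have hp : p ≤ q := h p (List.mem_cons_self ..)
    simp only [pvGdesc]
    congr 1
    rw [pvNums_succ body p q hp, List.append_assoc]
    exact pvRed_perm tail p (List.Perm.append_left _ List.perm_append_comm)

-- MAIN invariant: A's loop computes the descending group sum
theorem pvLoopA_eq_gdesc (body : List (List Char)) (tail : List Char) :
    ∀ (q : Nat) (set : List Int) (tot : Int),
      pvLoopA body tail q set tot = tot + pvGdesc body tail ((pvSyms tail q).reverse) q set := by
  intro q
  induction q with
  | zero => intro set tot; simp [pvLoopA, pvSyms, pvGdesc]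
  | succ q ih =>
    intro set tot
    cases hs : pvSym tail q with
    | true =>
      simp only [pvLoopA, hs, if_true]
      rw [ih, pvSyms_succ, hs]
      simp only [if_true, List.reverse_append, List.reverse_cons, List.reverse_nil,
        List.nil_append, List.singleton_append, pvGdesc]
      rw [pvNums_self]
      rw [pvRed_perm tail q (List.perm_append_comm)]
      ring
    | false =>
      simp only [pvLoopA, hs, Bool.false_eq_true, if_false]
      rw [ih, pvSyms_succ, hs]
      simp only [Bool.false_eq_true, if_false, List.append_nil]
      rw [pvGdesc_shift]
      intro p hp
      have hlt := pvSyms_lt tail q p (by simpa using hp)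
      omega

-- appending the largest symbol column to the ascending form
theorem pvCsum_concat (body : List (List Char)) (tail : List Char)
    (S : List Nat) (q b : Nat) :
    pvCsum body tail (S ++ [q]) b = pvCsum body tail S q + pvRed tail q (pvNums body q b) := by
  induction S with
  | nil => simp [pvCsum]
  | cons p ps ih =>
    simp only [List.cons_append, pvCsum]
    rw [ih]
    have : (ps ++ [q]).headD b = ps.headD q := by cases ps <;> simp
    rw [this]
    ring

-- ascending (B) and descending (proof-side) group sums agree
theorem pvCsum_eq_gdesc (body : List (List Char)) (tail : List Char) :
    ∀ (S : List Nat) (b : Nat),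
      pvCsum body tail S b = pvGdesc body tail S.reverse b [] := by
  intro S
  induction S using List.reverseRecOn with
  | nil => intro b; simp [pvCsum, pvGdesc]
  | append_singleton T q ih =>
    intro b
    rw [pvCsum_concat, List.reverse_append]
    simp only [List.reverse_cons, List.reverse_nil, List.nil_append, List.singleton_append,
      pvGdesc, List.append_nil]
    rw [ih]
    ring

-- A's reduction loop over a group, evaluated to sum/product
theorem pv_red_fold (sym : Char) (l : List Int) :
    l.foldl (fun r n => if sym = '+' then r + n else r * n)
      (if sym = '+' then (0 : Int) else 1)
    = if sym = '+' then l.sum else l.prod := by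
  by_cases h : sym = '+'
  · simp [h, List.sum_eq_foldl]
  · simp [h, List.prod_eq_foldl]

-- A's inner j-loop characterised as a fold over the filtered digit characters
theorem pv_inner_char (i : Int) :
    ∀ (bs : List (List Char)) (n : Int) (f : Bool),
      bs.foldl (fun (p : Int × Bool) row =>
          let ch := PySem.List.pyGetD row i ' '
          if ch ≠ ' ' then (p.1 * 10 + pvInt ch, true) else p) (n, f)
      = (((bs.map (fun row => PySem.List.pyGetD row i ' ')).filter (fun c => c ≠ ' ')).foldl
            (fun n d => n * 10 + pvInt d) n,
         f || !((bs.map (fun row => PySem.List.pyGetD row i ' ')).filter (fun c => c ≠ ' ')).isEmpty) := by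
  intro bs
  induction bs with
  | nil => intro n f; simp
  | cons r bs ih =>
    intro n f
    simp only [List.foldl_cons, List.map_cons, List.filter_cons]
    by_cases h : PySem.List.pyGetD r i ' ' = ' '
    · rw [if_neg (not_not_intro h)]
      rw [ih n f]
      simp [h]
    · rw [if_pos h]
      rw [ih]
      simp [h]

-- A's inner loop over the row indices equals the column-number computation on the body rows
theorem pv_innerA (rows : List (List Char)) (i : Nat) :
    ((PySem.List.pyRange 0 ((rows.length : Int) - 1) 1).foldl
      (fun (p : Int × Bool) (j : Int) =>
        let ch := PySem.List.pyGetD (PySem.List.pyGetD rows j []) ((i : Nat) : Int) ' '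
        if ch ≠ ' ' then (p.1 * 10 + pvInt ch, true) else p) ((0 : Int), false))
    = (match pvCN rows.dropLast i with
       | some n => (n, true)
       | none => ((0 : Int), false)) := by
  cases rows with
  | nil =>
    rw [show ((([] : List (List Char)).length : Int) - 1) = -1 by simp]
    rw [PySem.List.pyRange_one_eq_nil (by norm_num)]
    simp [pvCN]
  | cons r rs =>
    have hlen : (((r :: rs) : List (List Char)).length : Int) - 1
        = ((((r :: rs) : List (List Char)).dropLast).length : Int) := by
      simp [List.length_dropLast]
    rw [hlen]
    rw [PySem.List.foldl_congr_mem _ _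
      (fun (p : Int × Bool) (j : Int) =>
        (fun (p : Int × Bool) (row : List Char) =>
          let ch := PySem.List.pyGetD row ((i : Nat) : Int) ' '
          if ch ≠ ' ' then (p.1 * 10 + pvInt ch, true) else p) p
        (PySem.List.pyGetD ((r :: rs) : List (List Char)).dropLast j [])) _
      (by
        intro acc j hj
        have hmem := (PySem.List.mem_pyRange_one).mp hj
        have hj0 : 0 ≤ j := hmem.1
        have hjn : j = ((j.toNat : Nat) : Int) := (Int.toNat_of_nonneg hj0).symm
        have hn1 : j.toNat < ((r :: rs) : List (List Char)).dropLast.length := by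
          have h2 := hmem.2; omega
        have hn2 : j.toNat < ((r :: rs) : List (List Char)).length := by
          have h3 := hn1
          simp only [List.length_dropLast] at h3
          omega
        have hrow : PySem.List.pyGetD ((r :: rs) : List (List Char)) ((j.toNat : Nat) : Int) []
            = PySem.List.pyGetD (((r :: rs) : List (List Char)).dropLast) ((j.toNat : Nat) : Int) [] := by
          rw [PySem.List.pyGetD_natCast, PySem.List.pyGetD_natCast,
            List.getD_eq_getElem _ _ hn2, List.getD_eq_getElem _ _ hn1,
            List.getElem_dropLast]
        rw [hjn, hrow])]
    rw [PySem.List.foldl_pyRange_zero_pyGetD' (((r :: rs) : List (List Char)).dropLast) []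
      (fun (p : Int × Bool) (row : List Char) =>
          let ch := PySem.List.pyGetD row ((i : Nat) : Int) ' '
          if ch ≠ ' ' then (p.1 * 10 + pvInt ch, true) else p) ((0 : Int), false)]
    rw [pv_inner_char]
    simp only [pvCN]
    by_cases hd : ((((r :: rs) : List (List Char)).dropLast.map
        (fun row => PySem.List.pyGetD row ((i : Nat) : Int) ' ')).filter (fun c => c ≠ ' ')) = []
    · rw [if_pos hd, hd]
      simp
    · rw [if_neg hd]
      rw [show ((((r :: rs) : List (List Char)).dropLast.map
          (fun row => PySem.List.pyGetD row ((i : Nat) : Int) ' ')).filter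
            (fun c => c ≠ ' ')).isEmpty = false by
        cases hE : ((((r :: rs) : List (List Char)).dropLast.map
          (fun row => PySem.List.pyGetD row ((i : Nat) : Int) ' ')).filter
            (fun c => c ≠ ' ')) with
        | nil => exact absurd hE hd
        | cons a l => rfl]
      simp

-- A's outer column loop equals pvLoopA
theorem pv_outer_bridge (rows : List (List Char)) :
    ∀ (q : Nat) (set : List Int) (tot : Int),
      ((PySem.List.pyRange ((q : Int) - 1) (-1) (-1)).foldl
        (fun (st : List Int × Int) (i : Int) =>
          let inner := (PySem.List.pyRange 0 ((rows.length : Int) - 1) 1).foldl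
            (fun (p : Int × Bool) (j : Int) =>
              let ch := PySem.List.pyGetD (PySem.List.pyGetD rows j []) i ' '
              if ch ≠ ' ' then (p.1 * 10 + pvInt ch, true) else p)
            ((0 : Int), false)
          let cur_set := if inner.2 then st.1 ++ [inner.1] else st.1
          if i < ((rows.getLastD []).length : Int) ∧ PySem.List.pyGetD (rows.getLastD []) i ' ' ≠ ' ' then
            let symbol := PySem.List.pyGetD (rows.getLastD []) i ' '
            let res : Int := cur_set.foldl
              (fun r n => if symbol = '+' then r + n else r * n)
              (if symbol = '+' then (0 : Int) else 1)
            (([] : List Int), st.2 + res)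
          else (cur_set, st.2))
        (set, tot)).2
      = pvLoopA rows.dropLast (rows.getLastD []) q set tot := by
  intro q
  induction q with
  | zero =>
    intro set tot
    rw [show (((0 : Nat) : Int) - 1) = -1 by simp]
    rw [PySem.List.pyRange_neg_one_eq_nil (by norm_num)]
    simp [pvLoopA]
  | succ q ih =>
    intro set tot
    have hcons : PySem.List.pyRange (((q + 1 : Nat) : Int) - 1) (-1) (-1)
        = ((q : Nat) : Int) :: PySem.List.pyRange (((q : Nat) : Int) - 1) (-1) (-1) := by
      rw [show (((q + 1 : Nat) : Int) - 1) = ((q : Nat) : Int) by push_cast; ring]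
      exact PySem.List.pyRange_neg_one_cons (by omega)
    rw [hcons, List.foldl_cons]
    simp only [pv_innerA rows q]
    have hcond : (((q : Nat) : Int) < ((rows.getLastD []).length : Int)
        ∧ PySem.List.pyGetD (rows.getLastD []) ((q : Nat) : Int) ' ' ≠ ' ')
        ↔ pvSym (rows.getLastD []) q = true := by
      simp [pvSym]
    by_cases hs : pvSym (rows.getLastD []) q = true
    · rw [if_pos (hcond.mpr hs)]
      rw [pv_red_fold]
      rw [ih]
      simp only [pvLoopA, hs, if_true]
      congr 2
      cases hcn : pvCN rows.dropLast q <;>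
        simp [pvRed, Option.toList]
    · have hs' : pvSym (rows.getLastD []) q = false := by simpa using hs
      rw [if_neg (fun hc => hs (hcond.mp hc))]
      rw [ih]
      simp only [pvLoopA, hs', Bool.false_eq_true, if_false]
      congr 1
      cases hcn : pvCN rows.dropLast q <;> simp [Option.toList]

-- a slice of the column-number table is pvNums
theorem pv_group_eq (body : List (List Char)) (W p q : Nat) (hpq : p ≤ q) (hqW : q ≤ W) :
    ((((List.range W).map (fun i => pvCN body i)).drop p).take (q - p)).filterMap id
    = pvNums body p q := by
  have hx : (List.range W).drop p = List.range' p (W - p) := by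
    rw [List.range_eq_range', List.drop_range']; simp
  have hsplit : List.range' p (W - p) = List.range' p (q - p) ++ List.range' q (W - q) := by
    have h := List.range'_append (s := p) (m := q - p) (n := W - q) (step := 1)
    rw [show p + 1 * (q - p) = q by omega, show (q - p) + (W - q) = W - p by omega] at h
    exact h.symm
  have htake : ((List.range W).drop p).take (q - p) = List.range' p (q - p) := by
    rw [hx, hsplit]
    exact List.take_left' (by simp)
  rw [← List.map_drop, ← List.map_take, htake, List.filterMap_map]
  simp [pvNums]

-- B's zip loop over the symbol columns equals pvCsum
theorem pv_zipfold (body : List (List Char)) (tail : List Char) (W : Nat) :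
    ∀ (S : List Nat) (tot : Int), (S ++ [W]).Pairwise (· < ·) →
      ((S.zip (S.drop 1 ++ [W])).foldl
        (fun (total : Int) (pq : Nat × Nat) =>
          let group := ((((List.range W).map (fun i => pvCN body i)).drop pq.1).take
            (pq.2 - pq.1)).filterMap id
          total + (if PySem.List.pyGetD tail ((pq.1 : Nat) : Int) ' ' = '+' then group.sum
                   else group.foldl (· * ·) 1)) tot)
      = tot + pvCsum body tail S W := by
  intro S
  induction S with
  | nil => intro tot _; simp [pvCsum]
  | cons p ps ih =>
    intro tot h
    have hp := (List.pairwise_cons.mp h).1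
    have hps := (List.pairwise_cons.mp h).2
    cases ps with
    | nil =>
      have hpW : p < W := hp W (by simp)
      simp only [List.drop_succ_cons, List.drop_nil, List.nil_append, List.zip_cons_cons,
        List.zip_nil_right, List.foldl_cons, List.foldl_nil]
      rw [pv_group_eq body W p W (by omega) (le_refl W)]
      simp [pvCsum, pvRed, List.prod_eq_foldl]
    | cons r ps' =>
      have hpr : p < r := hp r (by simp)
      have hrW : r < W := by
        have := (List.pairwise_append.mp hps).2.2
        exact this r (by simp) W (by simp)
      have hzip : ((p :: r :: ps').zip ((p :: r :: ps').drop 1 ++ [W]))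
          = (p, r) :: ((r :: ps').zip ((r :: ps').drop 1 ++ [W])) := by
        simp [List.zip_cons_cons]
      rw [hzip, List.foldl_cons]
      rw [ih _ hps]
      rw [pv_group_eq body W p r (by omega) (by omega)]
      simp only [pvCsum, List.headD_cons]
      rw [show pvRed tail p (pvNums body p r)
          = (if PySem.List.pyGetD tail ((p : Nat) : Int) ' ' = '+' then (pvNums body p r).sum
             else (pvNums body p r).foldl (· * ·) 1) by
        simp [pvRed, List.prod_eq_foldl]]
      ring

-- the symbol-column list of port B, Pairwise-ordered together with the bound
theorem pv_syms_pairwise (tail : List Char) (W : Nat) :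
    ((pvSyms tail W) ++ [W]).Pairwise (· < ·) := by
  refine List.pairwise_append.mpr ⟨?_, by simp, ?_⟩
  · exact List.Pairwise.filter _ (List.pairwise_lt_range)
  · intro a ha b hb
    have := pvSyms_lt tail W a ha
    simp at hb
    omega

-- ===== VERDICT (by name: the statement is the Claim_ definition above) =====
theorem calculate_grand_total_pixel_spec : Claim_equal_calculate_grand_total_pixel := by
  unfold Claim_equal_calculate_grand_total_pixel
  intro lines _ _
  unfold Spec_calculate_grand_total_pixel
  have hA : calculate_grand_total_pixel lines
      = pvLoopA (lines.map pvNorm).dropLast ((lines.map pvNorm).getLastD [])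
          (((lines.map pvNorm).headD []).length) [] 0 := by
    simp only [calculate_grand_total_pixel]
    exact pv_outer_bridge (lines.map pvNorm) (((lines.map pvNorm).headD []).length) [] 0
  have hB : calculate_grand_total_pixel_alt lines
      = pvCsum (lines.map pvNorm).dropLast ((lines.map pvNorm).getLastD [])
          (pvSyms ((lines.map pvNorm).getLastD []) (((lines.map pvNorm).headD []).length))
          (((lines.map pvNorm).headD []).length) := by
    simp only [calculate_grand_total_pixel_alt]
    have h := pv_zipfold (lines.map pvNorm).dropLast ((lines.map pvNorm).getLastD [])
      (((lines.map pvNorm).headD []).length)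
      (pvSyms ((lines.map pvNorm).getLastD []) (((lines.map pvNorm).headD []).length)) 0
      (pv_syms_pairwise _ _)
    rw [zero_add] at h
    exact h
  rw [hA, hB]
  rw [pvLoopA_eq_gdesc, pvCsum_eq_gdesc, zero_add]
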